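-- pv_equiv track=rewrite | github.com/BehroozZare/gpu-ordering | Renders/Teaser/render_separator_in_patch_graph.py | classify_patches_by_side
-- ===== SOURCE A (Python) =====
-- def get_vertex_side(etree_id):
--     """
--     Returns 'separator', 'left', or 'right' based on etree node ID.
--
--     Binary tree structure:
--     - Node 0: root separator
--     - Node 1 and descendants (3,4,7,8,...): left subtree
--     - Node 2 and descendants (5,6,9,10,...): right subtree
--     """
--     if etree_id == 0:
--         return 'separator'
--
--     # Walk up the tree to find if ancestor is 1 (left) or 2 (right)
--     node = etree_id
--     while node > 2:
--         node = (node - 1) // 2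
--
--     return 'left' if node == 1 else 'right'
--
-- def classify_patches_by_side(patch_ids, etree_nodes, assigned_nodes):
--     """
--     Classify patches into left and right sets based on separator.
--
--     A patch appears in a set if it has ANY vertices on that side.
--     Patches spanning the separator will appear in both sets.
--
--     Args:
--         patch_ids: List of patch IDs for each vertex (indexed by original vertex ID)
--         etree_nodes: List of etree node IDs (in permuted order)
--         assigned_nodes: List of original vertex indices (mapping permuted -> original)
--
--     Returns:
--         Tuple (left_patches: set, right_patches: set)
--     """
--     left_patches = set()
--     right_patches = set()
--
--     # Build mapping: original_vertex_id -> side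
--     vertex_to_side = {}
--     for etree_id, orig_vertex in zip(etree_nodes, assigned_nodes):
--         side = get_vertex_side(etree_id)
--         vertex_to_side[orig_vertex] = side
--
--     # Classify patches based on their vertices
--     for orig_vertex, patch_id in enumerate(patch_ids):
--         side = vertex_to_side.get(orig_vertex)
--         if side == 'left':
--             left_patches.add(patch_id)
--         elif side == 'right':
--             right_patches.add(patch_id)
--         # Separator vertices don't contribute to classification
--
--     return left_patches, right_patches
-- ===== SOURCE B (Python) =====
-- def _vertex_side(etree_id):
--     # Side of an etree node in the implicit binary tree: node 0 is the root
--     # separator; deeper nodes reduce to their depth-1 ancestor in closed form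
--     # (the ancestor of node n at depth 1 is ((n+1) >> (bitlen(n+1)-2)) - 1).
--     if etree_id == 0:
--         return 'separator'
--     node = etree_id
--     if node > 2:
--         m = node + 1
--         node = (m >> (m.bit_length() - 2)) - 1
--     return 'left' if node == 1 else 'right'
--
--
-- def classify_patches_by_side(patch_ids, etree_nodes, assigned_nodes):
--     # Pass 1: walk the (etree_id, vertex) pairs backwards so the latest
--     # assignment of a vertex wins, keeping two plain vertex sets per side.
--     seen = set()
--     left_vs = set()
--     right_vs = set()
--     for etree_id, orig_vertex in reversed(list(zip(etree_nodes, assigned_nodes))):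
--         if orig_vertex in seen:
--             continue
--         seen.add(orig_vertex)
--         side = _vertex_side(etree_id)
--         if side == 'left':
--             left_vs.add(orig_vertex)
--         elif side == 'right':
--             right_vs.add(orig_vertex)
--
--     # Pass 2: a patch is on a side iff one of its vertices is.
--     left_patches = set()
--     right_patches = set()
--     for orig_vertex, patch_id in enumerate(patch_ids):
--         if orig_vertex in left_vs:
--             left_patches.add(patch_id)
--         elif orig_vertex in right_vs:
--             right_patches.add(patch_id)
--     return left_patches, right_patches
-- ===== Notes on version B (the rewrite author's own statement) =====
-- stated objective: alternative
-- what changed: The per-vertex ancestor-climbing while-loop is replaced by a closed-form bit computation of the depth-1 ancestor, and the last-write-wins dict of side strings is replaced by a single backwards dedup pass maintaining two vertex sets directly.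
import Mathlib
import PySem

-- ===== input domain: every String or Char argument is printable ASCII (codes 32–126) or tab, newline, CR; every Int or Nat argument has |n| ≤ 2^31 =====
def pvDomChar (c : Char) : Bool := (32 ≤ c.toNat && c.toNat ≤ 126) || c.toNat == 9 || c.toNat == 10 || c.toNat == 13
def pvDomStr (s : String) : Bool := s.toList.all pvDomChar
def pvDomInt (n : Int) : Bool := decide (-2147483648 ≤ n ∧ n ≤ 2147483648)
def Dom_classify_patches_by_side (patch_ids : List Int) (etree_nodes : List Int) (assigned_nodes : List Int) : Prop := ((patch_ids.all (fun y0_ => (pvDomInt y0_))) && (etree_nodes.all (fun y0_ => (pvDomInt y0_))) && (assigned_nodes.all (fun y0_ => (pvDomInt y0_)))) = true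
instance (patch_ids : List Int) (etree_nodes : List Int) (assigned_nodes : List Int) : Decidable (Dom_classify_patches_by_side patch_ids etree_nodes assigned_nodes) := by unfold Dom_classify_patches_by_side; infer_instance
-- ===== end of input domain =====

set_option maxHeartbeats 1000000


-- B replaces A's per-vertex ancestor-climbing loop by a closed-form bit computation of the
-- depth-1 ancestor, and A's dict of side strings by a backwards dedup pass maintaining two
-- vertex sets (alternative; same cost). Return-value equivalence; neither mutates arguments.

-- ===== PORT A =====
-- while node > 2: node = (node - 1) // 2
def pvWalkUp (node : Int) : Int :=
  if node > 2 then pvWalkUp (PySem.Int.floordiv (node - 1) 2) else node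
termination_by node.toNat
decreasing_by
  simp
  omega

def pvGetVertexSide (etree_id : Int) : String :=
  if etree_id = 0 then "separator"
  else if pvWalkUp etree_id = 1 then "left" else "right"

def classify_patches_by_side (patch_ids : List Int) (etree_nodes : List Int) (assigned_nodes : List Int) : List Int × List Int :=
  let vertex_to_side : PySem.Dict Int String :=
    (etree_nodes.zip assigned_nodes).foldl
      (fun d p => d.insert p.2 (pvGetVertexSide p.1)) PySem.Dict.empty
  (PySem.List.enumerate patch_ids 0).foldl
    (fun (acc : PySem.Set Int × PySem.Set Int) p =>
      let side := vertex_to_side.get? p.1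
      if side = some "left" then (PySem.Set.add acc.1 p.2, acc.2)
      else if side = some "right" then (acc.1, PySem.Set.add acc.2 p.2)
      else acc)
    (PySem.Set.empty, PySem.Set.empty)

-- ===== PORT B =====
-- if node > 2: node = ((node+1) >> (bitlen(node+1)-2)) - 1   (closed-form depth-1 ancestor)
def pvVertexSideAlt (etree_id : Int) : String :=
  if etree_id = 0 then "separator"
  else
    let node :=
      if etree_id > 2 then
        let m := etree_id + 1
        (m >>> (PySem.Int.bitLength m - 2)) - 1
      else etree_id
    if node = 1 then "left" else "right"

-- body of B's first loop (over reversed pairs): state = (seen, left_vs, right_vs)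
def pvSideStep (st : PySem.Set Int × PySem.Set Int × PySem.Set Int) (p : Int × Int) :
    PySem.Set Int × PySem.Set Int × PySem.Set Int :=
  if p.2 ∈ st.1 then st
  else
    let seen := PySem.Set.add st.1 p.2
    let s := pvVertexSideAlt p.1
    if s = "left" then (seen, PySem.Set.add st.2.1 p.2, st.2.2)
    else if s = "right" then (seen, st.2.1, PySem.Set.add st.2.2 p.2)
    else (seen, st.2.1, st.2.2)

def classify_patches_by_side_alt (patch_ids : List Int) (etree_nodes : List Int) (assigned_nodes : List Int) : List Int × List Int :=
  let st := ((etree_nodes.zip assigned_nodes).reverse).foldl pvSideStep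
    (PySem.Set.empty, PySem.Set.empty, PySem.Set.empty)
  (PySem.List.enumerate patch_ids 0).foldl
    (fun (acc : PySem.Set Int × PySem.Set Int) p =>
      if p.1 ∈ st.2.1 then (PySem.Set.add acc.1 p.2, acc.2)
      else if p.1 ∈ st.2.2 then (acc.1, PySem.Set.add acc.2 p.2)
      else acc)
    (PySem.Set.empty, PySem.Set.empty)

-- ===== PRECONDITION & SPEC =====
def Spec_classify_patches_by_side (patch_ids : List Int) (etree_nodes : List Int) (assigned_nodes : List Int) (out : List Int × List Int) : Prop := out = classify_patches_by_side_alt patch_ids etree_nodes assigned_nodes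
instance (patch_ids : List Int) (etree_nodes : List Int) (assigned_nodes : List Int) (out : List Int × List Int) : Decidable (Spec_classify_patches_by_side patch_ids etree_nodes assigned_nodes out) := by unfold Spec_classify_patches_by_side; infer_instance

-- ===== CLAIM (what is proved, stated in full; the proofs are below) =====
def Claim_equal_classify_patches_by_side : Prop := ∀ (patch_ids : List Int) (etree_nodes : List Int) (assigned_nodes : List Int), Dom_classify_patches_by_side patch_ids etree_nodes assigned_nodes → Spec_classify_patches_by_side patch_ids etree_nodes assigned_nodes (classify_patches_by_side patch_ids etree_nodes assigned_nodes)

-- ===== LEMMAS AND PROOFS =====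

-- the etree id of the LAST pair assigning vertex k, seen from the reversed list
def pvLastId (qs : List (Int × Int)) (k : Int) : Option Int :=
  (qs.find? (fun p => p.2 == k)).map Prod.fst

lemma pv_shift_full (M : Nat) (h : 4 ≤ M) :
    (M >>> (PySem.Int.bitLength (M:Int) - 2))
      = ((M / 2) >>> (PySem.Int.bitLength ((M / 2 : Nat) : Int) - 2)) := by
  have hb2 : 2 ≤ PySem.Int.bitLength ((M / 2 : Nat) : Int) := by
    have hlt := PySem.Int.lt_two_pow_bitLength ((M / 2 : Nat) : Int)
    simp only [Int.natAbs_natCast] at hlt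
    by_contra h'
    have h2 : (2:Nat) ^ PySem.Int.bitLength ((M / 2 : Nat):Int) ≤ 2 ^ 1 :=
      Nat.pow_le_pow_right (by norm_num) (by omega)
    omega
  rw [PySem.Int.bitLength_natCast (by omega : 0 < M)]
  have hk : PySem.Int.bitLength ((M / 2 : Nat) : Int) + 1 - 2
      = 1 + (PySem.Int.bitLength ((M / 2 : Nat) : Int) - 2) := by omega
  rw [hk, Nat.shiftRight_add]
  have h1 : M >>> 1 = M / 2 := by
    simpa using Nat.shiftRight_succ M 0
  rw [h1]

lemma pv_walkUp_closed (n : Int) (h : 0 < n) :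
    pvWalkUp n = ((n + 1) >>> (PySem.Int.bitLength (n + 1) - 2)) - 1 := by
  induction n using pvWalkUp.induct with
  | case1 x hx ih =>
    have h2 : PySem.Int.floordiv (x - 1) 2 = (x - 1) / 2 :=
      PySem.Int.floordiv_eq_ediv_of_pos (by norm_num)
    have hpos : 0 < PySem.Int.floordiv (x - 1) 2 := by rw [h2]; omega
    have hstep : pvWalkUp x = pvWalkUp (PySem.Int.floordiv (x - 1) 2) := by
      rw [pvWalkUp]; simp [hx]
    rw [hstep, ih hpos]
    set M : Nat := (x + 1).toNat with hM
    have hM4 : 4 ≤ M := by omega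
    have hxM : x + 1 = (M : Int) := by omega
    have hn'M : PySem.Int.floordiv (x - 1) 2 + 1 = ((M / 2 : Nat) : Int) := by
      rw [h2]; omega
    have hsh : (x + 1) >>> (PySem.Int.bitLength (x + 1) - 2)
        = (PySem.Int.floordiv (x - 1) 2 + 1) >>>
            (PySem.Int.bitLength (PySem.Int.floordiv (x - 1) 2 + 1) - 2) := by
      rw [hxM, hn'M]
      rw [show ((M : Int) >>> (PySem.Int.bitLength (M:Int) - 2))
            = ((M >>> (PySem.Int.bitLength (M:Int) - 2) : Nat) : Int) from rfl]
      rw [show (((M / 2 : Nat) : Int) >>> (PySem.Int.bitLength ((M / 2 : Nat):Int) - 2))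
            = (((M / 2) >>> (PySem.Int.bitLength ((M / 2 : Nat):Int) - 2) : Nat) : Int) from rfl]
      exact_mod_cast congrArg (fun t => ((t : Nat) : Int)) (pv_shift_full M hM4)
    rw [hsh]
  | case2 x hx =>
    interval_cases x
    · have h1 : pvWalkUp 1 = 1 := by rw [pvWalkUp]; norm_num
      rw [h1]; decide
    · have h1 : pvWalkUp 2 = 2 := by rw [pvWalkUp]; norm_num
      rw [h1]; decide

lemma pv_side_eq (e : Int) : pvGetVertexSide e = pvVertexSideAlt e := by
  unfold pvGetVertexSide pvVertexSideAlt
  by_cases h0 : e = 0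
  · simp [h0]
  by_cases hgt : e > 2
  · rw [pv_walkUp_closed e (by omega)]
    simp [h0, hgt]
  · have hw : pvWalkUp e = e := by
      rw [pvWalkUp, if_neg hgt]
    simp [h0, hgt, hw]

lemma pv_dictA_get (ps : List (Int × Int)) (d : PySem.Dict Int String) (k : Int) :
    (ps.foldl (fun d p => d.insert p.2 (pvGetVertexSide p.1)) d).get? k
      = ((pvLastId ps.reverse k).map pvGetVertexSide).or (d.get? k) := by
  induction ps generalizing d with
  | nil => simp [pvLastId]
  | cons p ps ih =>
    rw [List.foldl_cons, ih]
    rw [List.reverse_cons]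
    unfold pvLastId
    rw [List.find?_append]
    cases hf : ps.reverse.find? (fun q => q.2 == k) with
    | some q => simp [Option.or]
    | none =>
      by_cases hk : p.2 = k
      · subst hk
        have hbk : (p.2 == p.2) = true := by simp
        simp [List.find?, PySem.Dict.get?_insert_self]
      · rw [PySem.Dict.get?_insert_of_ne d (pvGetVertexSide p.1) (Ne.symm hk)]
        have hbk : (p.2 == k) = false := by simpa using hk
        simp [List.find?, hbk]

lemma pv_foldB_mem (qs : List (Int × Int)) (st : PySem.Set Int × PySem.Set Int × PySem.Set Int)
    (k : Int) :
    (k ∈ (qs.foldl pvSideStep st).2.1 ↔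
        k ∈ st.2.1 ∨ (k ∉ st.1 ∧ (pvLastId qs k).map pvVertexSideAlt = some "left")) ∧
    (k ∈ (qs.foldl pvSideStep st).2.2 ↔
        k ∈ st.2.2 ∨ (k ∉ st.1 ∧ (pvLastId qs k).map pvVertexSideAlt = some "right")) := by
  induction qs generalizing st with
  | nil => simp [pvLastId]
  | cons q qs ih =>
    rw [List.foldl_cons]
    have hlast : ∀ s : String, ((pvLastId (q :: qs) k).map pvVertexSideAlt = some s) =
        (if q.2 = k then pvVertexSideAlt q.1 = s
         else (pvLastId qs k).map pvVertexSideAlt = some s) := by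
      intro s
      unfold pvLastId
      by_cases hk : q.2 = k
      · have hbk : (q.2 == k) = true := by simpa using hk
        simp [List.find?, hk]
      · have hbk : (q.2 == k) = false := by simpa using hk
        simp [List.find?, hbk, hk]
    by_cases hq : q.2 ∈ st.1
    · have hstep : pvSideStep st q = st := by unfold pvSideStep; simp [hq]
      rw [hstep]
      have cond : ∀ s : String,
          (k ∉ st.1 ∧ (pvLastId (q :: qs) k).map pvVertexSideAlt = some s)
            ↔ (k ∉ st.1 ∧ (pvLastId qs k).map pvVertexSideAlt = some s) := by
        intro s
        constructor
        · rintro ⟨hs, hl⟩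
          have hk : ¬ q.2 = k := fun hkk => hs (hkk ▸ hq)
          rw [hlast s, if_neg hk] at hl
          exact ⟨hs, hl⟩
        · rintro ⟨hs, hl⟩
          have hk : ¬ q.2 = k := fun hkk => hs (hkk ▸ hq)
          exact ⟨hs, by rw [hlast s, if_neg hk]; exact hl⟩
      rcases ih st with ⟨ihL, ihR⟩
      exact ⟨by rw [ihL, cond "left"], by rw [ihR, cond "right"]⟩
    · by_cases hsl : pvVertexSideAlt q.1 = "left"
      · have hstep : pvSideStep st q = (st.1.add q.2, st.2.1.add q.2, st.2.2) := by
          unfold pvSideStep; simp [hq, hsl]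
        rw [hstep]
        rcases ih (st.1.add q.2, st.2.1.add q.2, st.2.2) with ⟨ihL, ihR⟩
        constructor
        · rw [ihL]
          by_cases hk : q.2 = k
          · subst hk
            simp [hlast, PySem.Set.mem_add, hsl, hq]
          · have hk' : ¬ k = q.2 := fun h => hk h.symm
            simp [hlast, PySem.Set.mem_add, hk, hk']
        · rw [ihR]
          by_cases hk : q.2 = k
          · subst hk
            simp [hlast, hsl, hq]
          · have hk' : ¬ k = q.2 := fun h => hk h.symm
            simp [hlast, PySem.Set.mem_add, hk, hk']
      · by_cases hsr : pvVertexSideAlt q.1 = "right"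
        · have hstep : pvSideStep st q = (st.1.add q.2, st.2.1, st.2.2.add q.2) := by
            unfold pvSideStep; simp [hq, hsr]
          rw [hstep]
          rcases ih (st.1.add q.2, st.2.1, st.2.2.add q.2) with ⟨ihL, ihR⟩
          constructor
          · rw [ihL]
            by_cases hk : q.2 = k
            · subst hk
              simp [hlast, hsr, hq]
            · have hk' : ¬ k = q.2 := fun h => hk h.symm
              simp [hlast, PySem.Set.mem_add, hk, hk']
          · rw [ihR]
            by_cases hk : q.2 = k
            · subst hk
              simp [hlast, PySem.Set.mem_add, hsr, hq]
            · have hk' : ¬ k = q.2 := fun h => hk h.symm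
              simp [hlast, PySem.Set.mem_add, hk, hk']
        · have hstep : pvSideStep st q = (st.1.add q.2, st.2.1, st.2.2) := by
            unfold pvSideStep; simp [hq, hsl, hsr]
          rw [hstep]
          rcases ih (st.1.add q.2, st.2.1, st.2.2) with ⟨ihL, ihR⟩
          constructor
          · rw [ihL]
            by_cases hk : q.2 = k
            · subst hk
              simp [hlast, hsl, hq]
            · have hk' : ¬ k = q.2 := fun h => hk h.symm
              simp [hlast, PySem.Set.mem_add, hk, hk']
          · rw [ihR]
            by_cases hk : q.2 = k
            · subst hk
              simp [hlast, hsr, hq]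
            · have hk' : ¬ k = q.2 := fun h => hk h.symm
              simp [hlast, PySem.Set.mem_add, hk, hk']

lemma pv_mem_left (pairs : List (Int × Int)) (k : Int) :
    k ∈ (pairs.reverse.foldl pvSideStep
          (PySem.Set.empty, PySem.Set.empty, PySem.Set.empty)).2.1
      ↔ (pairs.foldl (fun d p => d.insert p.2 (pvGetVertexSide p.1))
          PySem.Dict.empty).get? k = some "left" := by
  rw [pv_dictA_get]
  have he : (PySem.Dict.empty : PySem.Dict Int String).get? k = none := by simp [pysem]
  rw [he, Option.or_none]
  have hfe : pvGetVertexSide = pvVertexSideAlt := funext pv_side_eq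
  rw [hfe]
  rw [(pv_foldB_mem pairs.reverse (PySem.Set.empty, PySem.Set.empty, PySem.Set.empty) k).1]
  simp [PySem.Set.empty]

lemma pv_mem_right (pairs : List (Int × Int)) (k : Int) :
    k ∈ (pairs.reverse.foldl pvSideStep
          (PySem.Set.empty, PySem.Set.empty, PySem.Set.empty)).2.2
      ↔ (pairs.foldl (fun d p => d.insert p.2 (pvGetVertexSide p.1))
          PySem.Dict.empty).get? k = some "right" := by
  rw [pv_dictA_get]
  have he : (PySem.Dict.empty : PySem.Dict Int String).get? k = none := by simp [pysem]
  rw [he, Option.or_none]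
  have hfe : pvGetVertexSide = pvVertexSideAlt := funext pv_side_eq
  rw [hfe]
  rw [(pv_foldB_mem pairs.reverse (PySem.Set.empty, PySem.Set.empty, PySem.Set.empty) k).2]
  simp [PySem.Set.empty]

-- ===== VERDICT (by name: the statement is the Claim_ definition above) =====
theorem classify_patches_by_side_spec : Claim_equal_classify_patches_by_side := by
  intro pids ets asn _
  unfold Spec_classify_patches_by_side classify_patches_by_side classify_patches_by_side_alt
  dsimp only
  congr 1
  funext acc p
  have hL := pv_mem_left (ets.zip asn) p.1
  have hR := pv_mem_right (ets.zip asn) p.1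
  by_cases h1 : ((ets.zip asn).foldl (fun d p => d.insert p.2 (pvGetVertexSide p.1))
      PySem.Dict.empty).get? p.1 = some "left"
  · rw [if_pos h1, if_pos (hL.mpr h1)]
  · rw [if_neg h1, if_neg (fun hm => h1 (hL.mp hm))]
    by_cases h2 : ((ets.zip asn).foldl (fun d p => d.insert p.2 (pvGetVertexSide p.1))
        PySem.Dict.empty).get? p.1 = some "right"
    · rw [if_pos h2, if_pos (hR.mpr h2)]
    · rw [if_neg h2, if_neg (fun hm => h2 (hR.mp hm))]
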